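-- pv_equiv track=rewrite | github.com/ailyedu2030/CET | app/training/services/grading_service.py | _is_acceptable_variation
-- ===== SOURCE A (Python) =====
-- def _is_acceptable_variation(user_word: str, correct_word: str) -> bool:
--     """检查是否是可接受的单词变形."""
--     if not user_word or not correct_word:
--         return False
--
--     # 基本的变形检查
--     variations = [
--         correct_word + "s",  # 复数
--         correct_word + "es",  # 复数
--         correct_word + "ed",  # 过去式
--         correct_word + "ing",  # 现在分词
--         correct_word[:-1] + "ies" if correct_word.endswith("y") else None,  # y变ies
--     ]
--
--     return user_word in [v for v in variations if v is not None]
-- ===== SOURCE B (Python) =====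
-- def _is_acceptable_variation(user_word: str, correct_word: str) -> bool:
--     """Check morphological variation via a single longest-common-prefix scan."""
--     if not correct_word:
--         return False
--     k = 0
--     n = min(len(user_word), len(correct_word))
--     while k < n and user_word[k] == correct_word[k]:
--         k += 1
--     rest = user_word[k:]
--     if k == len(correct_word):
--         return rest in ("s", "es", "ed", "ing")
--     return k == len(correct_word) - 1 and correct_word[k] == "y" and rest == "ies"
-- ===== Notes on version B (the rewrite author's own statement) =====
-- stated objective: alternative
-- what changed: Instead of constructing the five candidate variation strings and testing list membership, B runs one longest-common-prefix scan over the two words and then decides in constant time from the leftover suffix (suffix in {s,es,ed,ing} when the whole correct word matched, or 'ies' after all-but-final-'y' matched).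
import Mathlib
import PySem

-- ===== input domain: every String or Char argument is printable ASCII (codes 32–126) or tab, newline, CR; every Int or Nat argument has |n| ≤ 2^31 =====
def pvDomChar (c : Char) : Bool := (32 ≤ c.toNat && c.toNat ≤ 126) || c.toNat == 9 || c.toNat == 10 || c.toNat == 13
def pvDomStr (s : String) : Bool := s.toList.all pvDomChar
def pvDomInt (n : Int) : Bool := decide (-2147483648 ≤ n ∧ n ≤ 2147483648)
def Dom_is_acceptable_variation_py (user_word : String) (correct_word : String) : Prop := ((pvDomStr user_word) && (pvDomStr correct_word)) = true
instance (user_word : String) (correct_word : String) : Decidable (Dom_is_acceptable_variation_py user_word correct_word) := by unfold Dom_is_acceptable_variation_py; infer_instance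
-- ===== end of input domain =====

-- B replaces A's "build five candidate strings and test membership" by a single
-- longest-common-prefix scan followed by a constant-time decision on the leftover
-- suffix (alternative decomposition, same cost).

-- ===== PORT A =====
-- A: guard on either input empty, build the variations list (the y→ies slot may be
-- None), filter out None, test membership.  Ported on List Char via PySem.Chars.
def is_acceptable_variation_py (user_word : String) (correct_word : String) : Bool :=
  let uw := user_word.toList
  let cw := correct_word.toList
  if uw.isEmpty || cw.isEmpty then false
  else
    let variations : List (Option (List Char)) :=
      [ some (cw ++ ['s'])
      , some (cw ++ ['e','s'])
      , some (cw ++ ['e','d'])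
      , some (cw ++ ['i','n','g'])
      , if PySem.Chars.endswith cw ['y']
          then some (PySem.Chars.slice cw none (some (-1)) ++ ['i','e','s'])
          else none ]
    (variations.filterMap id).contains uw

-- ===== PORT B =====
-- B's while loop "k = 0; while k < n and user_word[k] == correct_word[k]: k += 1"
-- as the structural recursion scanning both words in step.
def pvLcp : List Char → List Char → Nat
  | a :: as, b :: bs => if a = b then pvLcp as bs + 1 else 0
  | _, _ => 0

-- B: one guard (correct_word nonempty), compute the common-prefix length k, then
-- decide from the leftover suffix user_word[k:].
def is_acceptable_variation_py_alt (user_word : String) (correct_word : String) : Bool :=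
  let uw := user_word.toList
  let cw := correct_word.toList
  if cw.isEmpty then false
  else
    let k := pvLcp uw cw
    let rest := uw.drop k
    if k = cw.length then
      rest = ['s'] || rest = ['e','s'] || rest = ['e','d'] || rest = ['i','n','g']
    else
      -- "k == len(correct_word) - 1 and correct_word[k] == 'y' and rest == 'ies'"
      -- (the index k is in range exactly when the first conjunct holds)
      decide (k = cw.length - 1) && cw[k]? = some 'y' && rest = ['i','e','s']

-- ===== PRECONDITION & SPEC =====
def Spec_is_acceptable_variation_py (user_word : String) (correct_word : String) (out : Bool) : Prop := out = is_acceptable_variation_py_alt user_word correct_word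
instance (user_word : String) (correct_word : String) (out : Bool) : Decidable (Spec_is_acceptable_variation_py user_word correct_word out) := by unfold Spec_is_acceptable_variation_py; infer_instance

-- ===== CLAIM (what is proved, stated in full; the proofs are below) =====
def Claim_equal_is_acceptable_variation_py : Prop := ∀ (user_word : String) (correct_word : String), Dom_is_acceptable_variation_py user_word correct_word → Spec_is_acceptable_variation_py user_word correct_word (is_acceptable_variation_py user_word correct_word)

-- ===== LEMMAS AND PROOFS =====

-- The common characterization: uw is one of the five acceptable variations of cw.
def pvD (uw cw : List Char) : Prop :=
  uw = cw ++ ['s'] ∨ uw = cw ++ ['e','s'] ∨ uw = cw ++ ['e','d'] ∨ uw = cw ++ ['i','n','g'] ∨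
    (['y'] <:+ cw ∧ uw = cw.dropLast ++ ['i','e','s'])

theorem pvLcp_take (u c : List Char) : u.take (pvLcp u c) = c.take (pvLcp u c) := by
  induction u generalizing c with
  | nil => cases c <;> simp [pvLcp]
  | cons a as ih =>
    cases c with
    | nil => simp [pvLcp]
    | cons b bs =>
      simp only [pvLcp]
      split
      · next h => simp [h, List.take_succ_cons, ih bs]
      · simp

theorem pvLcp_append_self (c r : List Char) : pvLcp (c ++ r) c = c.length := by
  induction c with
  | nil => cases r <;> simp [pvLcp]
  | cons b bs ih => simp [pvLcp, ih]

theorem pvLcp_eq_length_iff (u c : List Char) : pvLcp u c = c.length ↔ c <+: u := by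
  constructor
  · intro h
    induction c generalizing u with
    | nil => exact List.nil_prefix
    | cons b bs ih =>
      cases u with
      | nil => simp [pvLcp] at h
      | cons a as =>
        simp only [pvLcp] at h
        split at h
        · next he =>
          subst he
          simp only [List.length_cons, Nat.add_right_cancel_iff] at h
          exact (List.prefix_cons_inj a).mpr (ih as h)
        · simp at h
  · rintro ⟨r, rfl⟩
    exact pvLcp_append_self c r

theorem pvLcp_append_cons (p : List Char) (x y : Char) (xs ys : List Char) (h : x ≠ y) :
    pvLcp (p ++ x :: xs) (p ++ y :: ys) = p.length := by
  induction p with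
  | nil => simp [pvLcp, h]
  | cons a as ih => simp [pvLcp, ih]

-- If cw ends in 'y' and uw is the y→ies variation, the scan stops exactly at
-- the 'y' (position |cw| - 1).
theorem pvLcp_ies (uw cw p : List Char) (hp : p ++ ['y'] = cw)
    (huw : uw = p ++ ['i','e','s']) : pvLcp uw cw = cw.length - 1 := by
  subst huw
  rw [← hp]
  have := pvLcp_append_cons p 'i' 'y' ['e','s'] [] (by decide)
  simpa using this

-- A characterized: membership in the candidate list is exactly pvD.
theorem A_iff (u c : String) (hc : c.toList ≠ []) (hu : u.toList ≠ []) :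
    is_acceptable_variation_py u c = true ↔ pvD u.toList c.toList := by
  unfold is_acceptable_variation_py pvD
  have h1 : u.toList.isEmpty = false := by simp [hu]
  have h2 : c.toList.isEmpty = false := by simp [hc]
  simp only [h1, h2, Bool.or_self, Bool.false_eq_true, if_false]
  cases hend : PySem.Chars.endswith c.toList ['y']
  · have hy : ¬ (['y'] <:+ c.toList) := by
      intro h
      have := (PySem.Chars.endswith_iff c.toList ['y']).mpr h
      simp [hend] at this
    simp only [Bool.false_eq_true, if_false, List.filterMap, id, List.contains_eq_mem,
      decide_eq_true_eq, List.mem_cons, List.not_mem_nil, or_false]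
    tauto
  · have hy : ['y'] <:+ c.toList := (PySem.Chars.endswith_iff c.toList ['y']).mp hend
    simp only [if_true, List.filterMap, id, List.contains_eq_mem, decide_eq_true_eq,
      List.mem_cons, List.not_mem_nil, or_false,
      PySem.Chars.slice_eq_listSlice, PySem.List.slice_to_neg_one]
    tauto

-- B characterized: the LCP scan decision is also exactly pvD.
set_option maxHeartbeats 1000000 in
theorem B_iff (u c : String) (hc : c.toList ≠ []) :
    is_acceptable_variation_py_alt u c = true ↔ pvD u.toList c.toList := by
  unfold is_acceptable_variation_py_alt pvD
  have h2 : c.toList.isEmpty = false := by simp [hc]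
  simp only [h2, Bool.false_eq_true, if_false]
  set uw := u.toList with huw
  set cw := c.toList with hcw
  by_cases hk : pvLcp uw cw = cw.length
  · obtain ⟨r, hr⟩ := (pvLcp_eq_length_iff uw cw).mp hk
    have hrest : uw.drop (pvLcp uw cw) = r := by rw [hk, ← hr]; simp
    have hyf : ¬ (['y'] <:+ cw ∧ uw = cw.dropLast ++ ['i','e','s']) := by
      rintro ⟨⟨p, hp⟩, he⟩
      have hpd : cw.dropLast = p := by rw [← hp]; simp
      have := pvLcp_ies uw cw p hp (by rw [he, hpd])
      rw [hk] at this
      have : cw.length ≠ 0 := by simp [hc]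
      omega
    rw [hk] at hrest
    have hdrop : ∀ sfx : List Char, uw.drop cw.length = sfx ↔ uw = cw ++ sfx := by
      intro sfx
      rw [hrest, ← hr]
      simp
    simp only [hk, if_true, Bool.or_eq_true, decide_eq_true_eq, hdrop]
    tauto
  · have hfour : ∀ sfx : List Char, uw ≠ cw ++ sfx := by
      intro sfx hsfx
      exact hk (by rw [hsfx]; exact pvLcp_append_self cw sfx)
    simp only [hk, if_false, Bool.and_eq_true, decide_eq_true_eq]
    constructor
    · rintro ⟨⟨hk1, hget⟩, hrest⟩
      have hklt : pvLcp uw cw < cw.length := by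
        have h0 : cw.length ≠ 0 := by simp [hc]
        have := Nat.sub_le cw.length 1
        omega
      have hgetE : cw[pvLcp uw cw]'hklt = 'y' := by
        rw [List.getElem?_eq_getElem hklt] at hget; simpa using hget
      have hlast : cw.getLast hc = 'y' := by
        rw [List.getLast_eq_getElem]
        simp only [← hk1]; exact hgetE
      have hsplit : cw.dropLast ++ ['y'] = cw := by
        rw [← hlast]; exact List.dropLast_concat_getLast hc
      refine Or.inr (Or.inr (Or.inr (Or.inr ⟨⟨cw.dropLast, hsplit⟩, ?_⟩)))
      have htk : uw.take (pvLcp uw cw) = cw.dropLast := by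
        rw [pvLcp_take, hk1, List.dropLast_eq_take]
      calc uw = uw.take (pvLcp uw cw) ++ uw.drop (pvLcp uw cw) :=
              (List.take_append_drop _ _).symm
        _ = cw.dropLast ++ ['i','e','s'] := by rw [htk, hrest]
    · rintro (h | h | h | h | ⟨⟨p, hp⟩, he⟩)
      · exact absurd h (hfour _)
      · exact absurd h (hfour _)
      · exact absurd h (hfour _)
      · exact absurd h (hfour _)
      · have hpd : cw.dropLast = p := by rw [← hp]; simp
        have hkval : pvLcp uw cw = cw.length - 1 := pvLcp_ies uw cw p hp (by rw [he, hpd])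
        refine ⟨⟨hkval, ?_⟩, ?_⟩
        · rw [hkval, ← hp]
          simp
        · rw [hkval, he, hpd, ← hp]
          simp

theorem pvD_not_empty (cw : List Char) : ¬ pvD [] cw := by
  unfold pvD
  rintro (h | h | h | h | ⟨_, h⟩) <;> simp at h

-- ===== VERDICT (by name: the statement is the Claim_ definition above) =====
theorem is_acceptable_variation_py_spec : Claim_equal_is_acceptable_variation_py := by
  intro u c _
  show is_acceptable_variation_py u c = is_acceptable_variation_py_alt u c
  by_cases hc : c.toList = []
  · unfold is_acceptable_variation_py is_acceptable_variation_py_alt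
    simp [hc]
  · by_cases hu : u.toList = []
    · have hA : is_acceptable_variation_py u c = false := by
        unfold is_acceptable_variation_py
        simp [hu]
      have hB : is_acceptable_variation_py_alt u c = false := by
        rcases hB : is_acceptable_variation_py_alt u c
        · rfl
        · have := (B_iff u c hc).mp hB
          rw [hu] at this
          exact absurd this (pvD_not_empty _)
      rw [hA, hB]
    · rw [Bool.eq_iff_iff, A_iff u c hc hu, B_iff u c hc]
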